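-- pv_equiv track=rewrite | github.com/vicety/LeetCode | python/interview/2023-fulltime/msft/oa/1.py | solution
-- ===== SOURCE A (Python) =====
-- def solution(S, B):
--     # write your code in Python (Python 3.6)
--
--     # fix  cost per
--     # 1 -> 2    2
--     # 2 -> 3    3/2
--     # 3 -> 4    4/3
--
--     # bigger always better than less
--     option = []
--     acc = 0
--     for c in S:
--         if c == 'x':
--             acc += 1
--         else:
--             option.append(acc)
--             acc = 0
--     if acc != 0:
--         option.append(acc)
--     option = sorted(option)
--
--     ans = 0
--     while B > 0 and len(option):
--         item = option.pop()
--         cost = item + 1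
--         if cost < B:
--             B -= cost
--             ans += item
--         else:
--             ans += (B - 1)
--             B = 0
--     return ans
-- ===== SOURCE B (Python) =====
-- def solution(S, B):
--     # Counting-sort variant: bucket run-lengths of 'x' in a dict during one scan,
--     # then apply the same greedy from the longest run downward (no comparison sort).
--     counts = {}
--     maxlen = 0
--     acc = 0
--     for c in S:
--         if c == 'x':
--             acc += 1
--         else:
--             if acc != 0:
--                 counts[acc] = counts.get(acc, 0) + 1
--                 if acc > maxlen:
--                     maxlen = acc
--             acc = 0
--     if acc != 0:
--         counts[acc] = counts.get(acc, 0) + 1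
--         if acc > maxlen:
--             maxlen = acc
--     ans = 0
--     for L in range(maxlen, 0, -1):
--         for _ in range(counts.get(L, 0)):
--             if B <= 0:
--                 return ans
--             if L + 1 < B:
--                 B -= L + 1
--                 ans += L
--             else:
--                 return ans + (B - 1)
--     return ans
-- ===== Notes on version B (the rewrite author's own statement) =====
-- stated objective: faster
-- what changed: B replaces the comparison sort of all run lengths (including the zero runs A records for every non-'x' character) with a counting dict built during the single scan, then applies the same greedy by walking the bucket lengths from the maximum downward.
import Mathlib
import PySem

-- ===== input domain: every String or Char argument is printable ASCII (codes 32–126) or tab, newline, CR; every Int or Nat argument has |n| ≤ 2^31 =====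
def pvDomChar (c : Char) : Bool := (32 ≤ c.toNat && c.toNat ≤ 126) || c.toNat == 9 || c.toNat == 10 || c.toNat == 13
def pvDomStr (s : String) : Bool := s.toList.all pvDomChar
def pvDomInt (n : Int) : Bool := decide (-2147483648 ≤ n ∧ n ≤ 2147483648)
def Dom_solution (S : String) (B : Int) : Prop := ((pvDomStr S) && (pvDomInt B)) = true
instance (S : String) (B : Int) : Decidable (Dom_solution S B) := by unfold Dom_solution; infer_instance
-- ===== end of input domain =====

-- B replaces A's comparison sort of the run lengths with a counting dict filled during the
-- one scan, walking bucket lengths from the maximum downward with the same greedy.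

-- ===== PORT A =====

-- A's while loop: pop the largest remaining run from the end of the sorted list.
def solAux (option : List Int) (B : Int) (ans : Int) : Int :=
  if h : 0 < B ∧ option ≠ [] then
    match hp : PySem.List.pop? option (-1) with
    | none => ans   -- unreachable: option ≠ []
    | some (item, rest) =>
      if item + 1 < B then solAux rest (B - (item + 1)) (ans + item)
      else ans + (B - 1)
  else ans
termination_by option.length
decreasing_by
  have h2 := PySem.List.length_of_pop?_eq_some option hp
  simp at h2
  omega

def solution (S : String) (B : Int) : Int :=
  let st := S.toList.foldl
    (fun (p : List Int × Int) c => if c = 'x' then (p.1, p.2 + 1) else (p.1 ++ [p.2], 0))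
    ([], 0)
  let option := if st.2 ≠ 0 then st.1 ++ [st.2] else st.1
  solAux (PySem.List.sorted option (fun x => x) false) B 0

-- ===== PORT B =====

-- scan state: (counts, maxlen, acc)
def bStep (p : PySem.Dict Int Int × Int × Int) (c : Char) : PySem.Dict Int Int × Int × Int :=
  if c = 'x' then (p.1, p.2.1, p.2.2 + 1)
  else if p.2.2 ≠ 0 then
    (p.1.insert p.2.2 (p.1.getD p.2.2 0 + 1),
     if p.2.2 > p.2.1 then p.2.2 else p.2.1, 0)
  else (p.1, p.2.1, 0)

-- inner 'for _ in range(counts.get(L, 0))' loop; Bool marks an early return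
def bInner (L : Int) : Nat → Int → Int → Int × Int × Bool
  | 0, B, ans => (B, ans, false)
  | k + 1, B, ans =>
    if B ≤ 0 then (B, ans, true)
    else if L + 1 < B then bInner L k (B - (L + 1)) (ans + L)
    else (B, ans + (B - 1), true)

-- outer 'for L in range(maxlen, 0, -1)' loop
def bOuter (d : PySem.Dict Int Int) : List Int → Int → Int → Int
  | [], _, ans => ans
  | L :: Ls, B, ans =>
    match bInner L (d.getD L 0).toNat B ans with
    | (B', ans', stop) => if stop then ans' else bOuter d Ls B' ans'

def solution_alt (S : String) (B : Int) : Int :=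
  let st := S.toList.foldl bStep (PySem.Dict.empty, 0, 0)
  let st2 := if st.2.2 ≠ 0 then
      (st.1.insert st.2.2 (st.1.getD st.2.2 0 + 1),
       if st.2.2 > st.2.1 then st.2.2 else st.2.1)
    else (st.1, st.2.1)
  bOuter st2.1 (PySem.List.pyRange st2.2 0 (-1)) B 0

-- ===== PRECONDITION & SPEC =====
def Spec_solution (S : String) (B : Int) (out : Int) : Prop := out = solution_alt S B
instance (S : String) (B : Int) (out : Int) : Decidable (Spec_solution S B out) := by unfold Spec_solution; infer_instance

-- ===== CLAIM (what is proved, stated in full; the proofs are below) =====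
def Claim_equal_solution : Prop := ∀ (S : String) (B : Int), Dom_solution S B → Spec_solution S B (solution S B)

-- ===== LEMMAS AND PROOFS =====

-- the greedy loop as structural recursion over the runs in descending order
def go : List Int → Int → Int → Int
  | [], _, ans => ans
  | item :: rest, B, ans =>
    if B ≤ 0 then ans
    else if item + 1 < B then go rest (B - (item + 1)) (ans + item)
    else ans + (B - 1)

theorem solAux_reverse_eq_go (r : List Int) : ∀ B ans, solAux r.reverse B ans = go r B ans := by
  induction r with
  | nil => intro B ans; rw [solAux.eq_def, go]; simp
  | cons x rs ih =>
    intro B ans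
    rw [List.reverse_cons, solAux.eq_def, go]
    by_cases hB : 0 < B
    · rw [dif_pos ⟨hB, by simp⟩]
      split
      · next hp =>
        rw [PySem.List.pop?_last] at hp
        exact absurd hp (by simp)
      · next item rest hp =>
        rw [PySem.List.pop?_last, Option.some.injEq, Prod.mk.injEq] at hp
        obtain ⟨h1, h2⟩ := hp
        subst h1; subst h2
        rw [if_neg (by omega : ¬ B ≤ 0)]
        by_cases hx : x + 1 < B
        · rw [if_pos hx, if_pos hx, ih]
        · rw [if_neg hx, if_neg hx]
    · rw [dif_neg (by tauto), if_pos (by omega)]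

-- trailing zero runs never change the answer
theorem go_append_zeros (l : List Int) (m : Nat) : ∀ B ans, go (l ++ List.replicate m 0) B ans = go l B ans := by
  induction l with
  | nil =>
    intro B ans
    induction m generalizing B ans with
    | zero => rfl
    | succ k ihk =>
      simp only [List.nil_append, List.replicate_succ, go]
      by_cases hB : B ≤ 0
      · rw [if_pos hB]
      · rw [if_neg hB]
        by_cases h1 : (0:Int) + 1 < B
        · rw [if_pos h1]; simpa using ihk (B - (0 + 1)) ans
        · rw [if_neg h1]
          omega
  | cons x xs ih =>
    intro B ans
    simp only [List.cons_append, go]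
    split_ifs with h1 h2
    · rfl
    · exact ih _ _
    · rfl

-- the inner bucket loop is go over 'replicate k L' followed by the rest
theorem go_replicate_append (L : Int) (k : Nat) : ∀ rest B ans,
    go (List.replicate k L ++ rest) B ans =
      (match bInner L k B ans with
       | (B', ans', stop) => if stop then ans' else go rest B' ans') := by
  induction k with
  | zero => intro rest B ans; simp [bInner]
  | succ n ih =>
    intro rest B ans
    simp only [List.replicate_succ, List.cons_append, go, bInner]
    by_cases hB : B ≤ 0
    · rw [if_pos hB, if_pos hB]; simp
    · rw [if_neg hB, if_neg hB]
      by_cases hx : L + 1 < B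
      · rw [if_pos hx, if_pos hx, ih]
      · rw [if_neg hx, if_neg hx]; simp

-- the outer loop is go over the flattened buckets
theorem go_flat_eq_bOuter (d : PySem.Dict Int Int) (cnt : Int → Nat) :
    ∀ (Ls : List Int), (∀ L ∈ Ls, (d.getD L 0).toNat = cnt L) →
    ∀ B ans, go (Ls.flatMap (fun L => List.replicate (cnt L) L)) B ans = bOuter d Ls B ans := by
  intro Ls
  induction Ls with
  | nil => intro _ B ans; simp [bOuter, go]
  | cons L Ls ih =>
    intro h B ans
    simp only [List.flatMap_cons, bOuter]
    rw [h L (by simp)] at *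
    rw [go_replicate_append]
    rcases hbi : bInner L (cnt L) B ans with ⟨B', ans', stop⟩
    simp only []
    cases stop
    · simp only [if_neg (by simp : ¬ (false = true))]
      exact ih (fun L hL => h L (by simp [hL])) B' ans'
    · simp

-- count of one flattened bucket list
theorem count_flatMap_replicate (cnt : Int → Nat) :
    ∀ (Ls : List Int), Ls.Nodup → ∀ v,
      (Ls.flatMap (fun L => List.replicate (cnt L) L)).count v = if v ∈ Ls then cnt v else 0 := by
  intro Ls
  induction Ls with
  | nil => simp
  | cons L Ls ih =>
    intro hnd v
    simp only [List.flatMap_cons, List.count_append, List.count_replicate]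
    have hnd' := hnd
    rw [List.nodup_cons] at hnd'
    rw [ih hnd'.2 v]
    by_cases hv : v = L
    · subst hv
      simp [hnd'.1]
    · simp [hv, Ne.symm hv, List.mem_cons]

-- pairwise order of the flattened buckets
theorem pairwise_flatMap_replicate (cnt : Int → Nat) :
    ∀ (Ls : List Int), Ls.Pairwise (· < ·) →
      (Ls.flatMap (fun L => List.replicate (cnt L) L)).Pairwise (· ≤ ·) := by
  intro Ls
  induction Ls with
  | nil => simp
  | cons L Ls ih =>
    intro hp
    rw [List.pairwise_cons] at hp
    simp only [List.flatMap_cons]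
    rw [List.pairwise_append]
    refine ⟨List.pairwise_replicate.2 (by simp), ih hp.2, ?_⟩
    intro a ha b hb
    have ha' : a = L := (List.eq_of_mem_replicate ha)
    rcases List.mem_flatMap.1 hb with ⟨M, hM, hbM⟩
    have hb' : b = M := List.eq_of_mem_replicate hbM
    subst ha'; subst hb'
    exact le_of_lt (hp.1 _ hM)

-- the scan invariant relating A's run list to B's (counts, maxlen) state
def ScanInv (opt : List Int) (d : PySem.Dict Int Int) (m a : Int) : Prop :=
  0 ≤ a ∧ 0 ≤ m ∧
  (∀ v : Int, 1 ≤ v → d.getD v 0 = (opt.count v : Int)) ∧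
  (∀ v ∈ opt, 0 ≤ v ∧ v ≤ m)

-- pushing one run into the buckets preserves the invariant
theorem scanInv_push (opt : List Int) (d : PySem.Dict Int Int) (m a : Int)
    (h : ScanInv opt d m a) (ha : a ≠ 0) :
    ScanInv (opt ++ [a]) (d.insert a (d.getD a 0 + 1)) (if a > m then a else m) 0 := by
  obtain ⟨hnn, hm, hcnt, hbd⟩ := h
  refine ⟨le_refl _, by split <;> omega, ?_, ?_⟩
  · intro v hv
    rw [PySem.Dict.getD_insert]
    by_cases hva : v = a
    · subst hva
      rw [if_pos rfl, hcnt v hv]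
      simp [List.count_append]
    · rw [if_neg hva, hcnt v hv]
      simp [List.count_append, List.count_singleton, Ne.symm hva]
  · intro v hv
    rcases List.mem_append.1 hv with h1 | h1
    · have := hbd v h1
      constructor
      · exact this.1
      · split <;> omega
    · simp at h1; subst h1
      constructor
      · omega
      · split <;> omega

theorem scanInv_zero (opt : List Int) (d : PySem.Dict Int Int) (m : Int)
    (h : ScanInv opt d m 0) :
    ScanInv (opt ++ [0]) d m 0 := by
  obtain ⟨hnn, hm, hcnt, hbd⟩ := h
  refine ⟨le_refl _, hm, ?_, ?_⟩
  · intro v hv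
    rw [hcnt v hv]
    have : ((0:Int) == v) = false := by simp; omega
    simp [List.count_append, List.count_singleton, this]
  · intro v hv
    rcases List.mem_append.1 hv with h1 | h1
    · exact hbd v h1
    · simp at h1; subst h1; exact ⟨le_refl _, hm⟩

-- the two scans stay aligned
theorem scan_fold (cs : List Char) : ∀ (opt : List Int) (d : PySem.Dict Int Int) (m a : Int),
    ScanInv opt d m a →
    (cs.foldl (fun (p : List Int × Int) c => if c = 'x' then (p.1, p.2 + 1) else (p.1 ++ [p.2], 0)) (opt, a)).2
      = (cs.foldl bStep (d, m, a)).2.2 ∧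
    ScanInv (cs.foldl (fun (p : List Int × Int) c => if c = 'x' then (p.1, p.2 + 1) else (p.1 ++ [p.2], 0)) (opt, a)).1
      (cs.foldl bStep (d, m, a)).1
      (cs.foldl bStep (d, m, a)).2.1
      (cs.foldl (fun (p : List Int × Int) c => if c = 'x' then (p.1, p.2 + 1) else (p.1 ++ [p.2], 0)) (opt, a)).2 := by
  induction cs with
  | nil => intro opt d m a h; exact ⟨rfl, h⟩
  | cons c cs ih =>
    intro opt d m a h
    simp only [List.foldl_cons]
    by_cases hc : c = 'x'
    · have hB : bStep (d, m, a) c = (d, m, a + 1) := by simp [bStep, hc]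
      rw [if_pos hc, hB]
      exact ih opt d m (a + 1) ⟨by have := h.1; omega, h.2.1, h.2.2.1, h.2.2.2⟩
    · rw [if_neg hc]
      by_cases ha : a ≠ 0
      · have hB : bStep (d, m, a) c = (d.insert a (d.getD a 0 + 1), if a > m then a else m, 0) := by
          simp [bStep, hc, ha]
        rw [hB]
        exact ih _ _ _ _ (scanInv_push opt d m a h ha)
      · push_neg at ha; subst ha
        have hB : bStep (d, m, 0) c = (d, m, 0) := by simp [bStep, hc]
        rw [hB]
        exact ih _ _ _ _ (scanInv_zero opt d m h)

-- master lemma: the greedy over the sorted run list equals the bucket walk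
theorem master (runs : List Int) (d : PySem.Dict Int Int) (m : Int)
    (hm : 0 ≤ m)
    (hcnt : ∀ v : Int, 1 ≤ v → d.getD v 0 = (runs.count v : Int))
    (hbd : ∀ v ∈ runs, 0 ≤ v ∧ v ≤ m) (B : Int) :
    solAux (PySem.List.sorted runs (fun x => x) false) B 0 = bOuter d (PySem.List.pyRange m 0 (-1)) B 0 := by
  set asc : List Int := List.replicate (runs.count 0) (0:Int)
      ++ (PySem.List.pyRange 1 (m+1) 1).flatMap (fun L => List.replicate (runs.count L) L) with hasc
  have hnodup : (PySem.List.pyRange 1 (m+1) 1).Nodup := PySem.List.nodup_pyRange_one 1 (m+1)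
  have hperm : asc.Perm runs := by
    rw [List.perm_iff_count]
    intro v
    rw [hasc, List.count_append, List.count_replicate,
        count_flatMap_replicate _ _ hnodup v]
    simp only [beq_iff_eq]
    by_cases hv0 : v = 0
    · subst hv0
      have : (0:Int) ∉ PySem.List.pyRange 1 (m+1) 1 := by
        rw [PySem.List.mem_pyRange_one]; omega
      simp [this]
    · rw [if_neg (Ne.symm hv0)]
      by_cases hvr : v ∈ PySem.List.pyRange 1 (m+1) 1
      · simp [hvr]
      · rw [if_neg hvr]
        rw [PySem.List.mem_pyRange_one] at hvr
        have : v ∉ runs := by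
          intro hmem
          have := hbd v hmem
          omega
        simp [List.count_eq_zero.2 this]
  have hpw : asc.Pairwise (· ≤ ·) := by
    rw [hasc, List.pairwise_append]
    refine ⟨List.pairwise_replicate.2 (by simp),
      pairwise_flatMap_replicate _ _ (PySem.List.pairwise_lt_pyRange_one 1 (m+1)), ?_⟩
    intro a ha b hb
    have ha' : a = 0 := List.eq_of_mem_replicate ha
    rcases List.mem_flatMap.1 hb with ⟨M, hM, hbM⟩
    have hb' : b = M := List.eq_of_mem_replicate hbM
    rw [PySem.List.mem_pyRange_one] at hM
    subst ha'; subst hb'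
    omega
  have hsorted : PySem.List.sorted runs (fun x => x) false = asc :=
    PySem.List.sorted_id_eq_of_perm_of_pairwise runs asc hperm hpw
  have hrev : asc.reverse = (PySem.List.pyRange m 0 (-1)).flatMap (fun L => List.replicate (runs.count L) L)
      ++ List.replicate (runs.count 0) (0:Int) := by
    rw [hasc, List.reverse_append, List.reverse_replicate, List.reverse_flatMap]
    congr 1
    rw [PySem.List.pyRange_neg_one_eq_reverse]
    norm_num
    simp [Function.comp_def, List.reverse_replicate]
  have hasc_eq : asc = ((PySem.List.pyRange m 0 (-1)).flatMap (fun L => List.replicate (runs.count L) L)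
      ++ List.replicate (runs.count 0) (0:Int)).reverse := by
    rw [← hrev, List.reverse_reverse]
  rw [hsorted, hasc_eq, solAux_reverse_eq_go, go_append_zeros]
  apply go_flat_eq_bOuter
  intro L hL
  rw [PySem.List.mem_pyRange_neg_one] at hL
  rw [hcnt L (by omega)]
  simp

-- ===== VERDICT (by name: the statement is the Claim_ definition above) =====
theorem solution_spec : Claim_equal_solution := by
  intro S B _
  unfold Spec_solution solution solution_alt
  simp only []
  obtain ⟨haeq, hinv⟩ := scan_fold S.toList [] PySem.Dict.empty 0 0
    ⟨le_refl _, le_refl _, by intro v _; simp [PySem.Dict.getD_empty], by intro v h; simp at h⟩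
  set pA := S.toList.foldl (fun (p : List Int × Int) c => if c = 'x' then (p.1, p.2 + 1) else (p.1 ++ [p.2], 0)) ([], 0) with hpA
  set pB := S.toList.foldl bStep (PySem.Dict.empty, 0, 0) with hpB
  obtain ⟨hnn, hm, hcnt, hbd⟩ := hinv
  by_cases ha : pA.2 ≠ 0
  · rw [if_pos ha, if_pos (by rw [← haeq]; exact ha)]
    have h2 := scanInv_push pA.1 pB.1 pB.2.1 pA.2 ⟨hnn, hm, hcnt, hbd⟩ ha
    rw [← haeq]
    exact master _ _ _ h2.2.1 h2.2.2.1 h2.2.2.2 B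
  · rw [if_neg ha, if_neg (by rw [← haeq]; exact ha)]
    exact master _ _ _ hm hcnt hbd B
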